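-- pv_equiv track=rewrite | github.com/Tinus1424/dss | old/1_dp/week3/TK2-feedback/assignment2.py | multi3_odd
-- ===== SOURCE A (Python) =====
-- def multi3_odd(start, finish):
--     i = 0
--     for number in range(start, finish + 1):
--         if number % 2 == 0:
--             continue
--         elif number % 3 == 0:
--             i += 1
--     return i #Int reflecting how many odd numbers between start
-- ===== SOURCE B (Python) =====
-- def multi3_odd(start, finish):
--     # Closed-form: count integers congruent to 3 mod 6 in [start, finish].
--     if finish < start:
--         return 0
--     return (finish - 3) // 6 - (start - 4) // 6
-- ===== Notes on version B (the rewrite author's own statement) =====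
-- stated objective: faster
-- what changed: Replaces the O(finish-start) scan over range(start, finish+1) with an O(1) closed-form count of integers congruent to 3 mod 6 via floor division.
import Mathlib
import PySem

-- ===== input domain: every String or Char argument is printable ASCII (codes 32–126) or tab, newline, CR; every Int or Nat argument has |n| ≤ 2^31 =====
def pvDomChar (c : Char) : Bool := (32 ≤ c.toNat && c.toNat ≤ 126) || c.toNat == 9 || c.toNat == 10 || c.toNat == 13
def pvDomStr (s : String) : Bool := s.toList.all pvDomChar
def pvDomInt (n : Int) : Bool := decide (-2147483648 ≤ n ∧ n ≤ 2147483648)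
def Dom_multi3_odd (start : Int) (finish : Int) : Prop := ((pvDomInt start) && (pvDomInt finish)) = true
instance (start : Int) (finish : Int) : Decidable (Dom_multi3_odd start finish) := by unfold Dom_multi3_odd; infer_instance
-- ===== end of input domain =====

-- B replaces A's linear scan over range(start, finish+1) with an O(1) closed-form floor-division count of integers ≡ 3 (mod 6).


-- ===== PORT A =====
def multi3_odd (start : Int) (finish : Int) : Int :=
  (PySem.List.pyRange start (finish + 1) 1).foldl
    (fun i number =>
      if PySem.Int.mod number 2 = 0 then i
      else if PySem.Int.mod number 3 = 0 then i + 1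
      else i) 0

-- ===== PORT B =====
def multi3_odd_alt (start : Int) (finish : Int) : Int :=
  if finish < start then 0
  else PySem.Int.floordiv (finish - 3) 6 - PySem.Int.floordiv (start - 4) 6

-- ===== PRECONDITION & SPEC =====
def Spec_multi3_odd (start : Int) (finish : Int) (out : Int) : Prop := out = multi3_odd_alt start finish
instance (start : Int) (finish : Int) (out : Int) : Decidable (Spec_multi3_odd start finish out) := by unfold Spec_multi3_odd; infer_instance

-- ===== CLAIM (what is proved, stated in full; the proofs are below) =====
def Claim_equal_multi3_odd : Prop := ∀ (start : Int) (finish : Int), Dom_multi3_odd start finish → Spec_multi3_odd start finish (multi3_odd start finish)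

-- ===== LEMMAS AND PROOFS =====

-- The loop body adds the indicator of "odd and divisible by 3", i.e. of x ≡ 3 (mod 6).
theorem multi3_body_eq (acc x : Int) :
    (if PySem.Int.mod x 2 = 0 then acc
     else if PySem.Int.mod x 3 = 0 then acc + 1
     else acc) = acc + (if x % 6 = 3 then 1 else 0) := by
  rw [PySem.Int.mod_eq_emod_of_pos (a:=x) (b:=2) (by norm_num),
      PySem.Int.mod_eq_emod_of_pos (a:=x) (b:=3) (by norm_num)]
  split_ifs <;> omega

-- One step of the closed-form counter: fd(x-3) − fd(x-4) is the indicator of x ≡ 3 (mod 6).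
theorem fd_step (x : Int) :
    PySem.Int.floordiv (x - 3) 6 =
      PySem.Int.floordiv (x - 4) 6 + (if x % 6 = 3 then 1 else 0) := by
  rw [PySem.Int.floordiv_eq_ediv_of_pos (a:=x-3) (b:=6) (by norm_num),
      PySem.Int.floordiv_eq_ediv_of_pos (a:=x-4) (b:=6) (by norm_num)]
  split_ifs <;> omega

theorem multi3_loop_eq (n : Nat) (start : Int) :
    multi3_odd start (start + n) =
      PySem.Int.floordiv (start + n - 3) 6 - PySem.Int.floordiv (start - 4) 6 := by
  induction n with
  | zero =>
    simp only [multi3_odd, Nat.cast_zero, add_zero]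
    rw [PySem.List.pyRange_one_singleton start]
    simp only [List.foldl_cons, List.foldl_nil, multi3_body_eq, zero_add]
    rw [fd_step start]; omega
  | succ k ih =>
    have h : start + (k + 1 : Nat) + 1 = (start + k + 1) + 1 := by push_cast; ring
    have h2 : start + (k + 1 : Nat) = start + k + 1 := by push_cast; ring
    unfold multi3_odd at ih ⊢
    rw [h, PySem.List.pyRange_one_succ_right (a:=start) (b:=start+k+1) (by omega),
        List.foldl_append]
    rw [ih, List.foldl_cons, List.foldl_nil, multi3_body_eq, h2, fd_step (start + k + 1),
        show start + (k:Int) + 1 - 4 = start + (k:Int) - 3 from by ring]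
    omega

-- ===== VERDICT (by name: the statement is the Claim_ definition above) =====
theorem multi3_odd_spec : Claim_equal_multi3_odd := by
  intro start finish _
  unfold Spec_multi3_odd multi3_odd_alt
  split_ifs with h
  · unfold multi3_odd
    rw [PySem.List.pyRange_one_eq_nil (a:=start) (b:=finish+1) (by omega)]
    rfl
  · have hn : finish = start + ((finish - start).toNat : Nat) := by omega
    rw [hn, multi3_loop_eq]
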